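-- pv_equiv track=rewrite | github.com/jonathankirtland/pythonalgopractice | solve.py | solve
-- ===== SOURCE A (Python) =====
-- def solve(grid):
--     #create a copy for grabbing total coins later
--     default_matrix = [row[:] for row in grid]
--
--     #for an n by n grid
--     n = len(grid)
--
--     #run it twice because some values are dropped
--     solve_grid(grid,n)
--     solve_grid(grid,n)
--
--     #get the number of coints
--     coins = 0
--     for o in range(n):
--         for i in range(n):
--             coins += grid[o][i] - default_matrix[o][i]
--     return coins
--
-- def solve_grid (grid, n):
--     for row in range(n):
--         max_ = grid[row][0]
--         index = 0
--         i = 1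
--
--         for i in range(n):
--             if grid[row][i] >= max_:
--                 max_ = grid[row][i]
--                 index = i
--         indr = index
--
--         #from the back
--         temp = grid[row][n-1]
--         for col in range(n-1,indr,-1):
--             temp = max(temp,grid[row][col])
--             grid[row][col] = temp
--
--         #from the front
--         temp = grid[row][0]
--         for col in range(1,indr):
--             temp = max(temp,grid[row][col])
--             grid[row][col] = temp
--
--     for col in range (n):
--         #assume max is first
--         max_ = grid[0][col]
--         index = 0
--         i = 1
--
--         for i in range(n):
--             if grid[i][col] >= max_:
--                 max_ = grid[i][col]
--                 index = i
--             indc = index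
--
--         #back to ind
--         temp = grid[n-1][col]
--         for row in range(n-1,indc,-1):
--             temp = max(temp,grid[row][col])
--             grid[row][col] = temp
--
--         #front to ind
--         temp = grid[0][col]
--         for row in range(1,indc):
--             temp = max(temp,grid[row][col])
--             grid[row][col] = temp
-- ===== SOURCE B (Python) =====
-- # B: functional rewrite — each line transform is elementwise min(prefix-running-max, suffix-running-max),
-- # replacing A's argmax-then-two-directional-fill; works on a copy (does not mutate the caller's grid).
-- def solve(grid):
--     def smooth(line):
--         p = []
--         m = line[0]
--         for x in line:
--             m = max(m, x)
--             p.append(m)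
--         s = []
--         m = line[-1]
--         for x in reversed(line):
--             m = max(m, x)
--             s.append(m)
--         s.reverse()
--         return [min(a, b) for a, b in zip(p, s)]
--
--     def transpose(g):
--         return [list(c) for c in zip(*g)]
--
--     n = len(grid)
--     g = [row[:n] for row in grid]
--     total0 = sum(sum(row) for row in g)
--     for _ in range(2):
--         g = [smooth(r) for r in g]
--         g = transpose([smooth(c) for c in transpose(g)])
--     return sum(sum(row) for row in g) - total0
-- ===== Notes on version B (the rewrite author's own statement) =====
-- stated objective: simpler
-- what changed: A finds each line's last argmax and runs two in-place directional fill loops per line (twice over rows and columns, mutating the grid); B computes each smoothed line functionally as elementwise min of the prefix running max and suffix running max, handles columns by transposing, and works on a copy.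
import Mathlib
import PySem

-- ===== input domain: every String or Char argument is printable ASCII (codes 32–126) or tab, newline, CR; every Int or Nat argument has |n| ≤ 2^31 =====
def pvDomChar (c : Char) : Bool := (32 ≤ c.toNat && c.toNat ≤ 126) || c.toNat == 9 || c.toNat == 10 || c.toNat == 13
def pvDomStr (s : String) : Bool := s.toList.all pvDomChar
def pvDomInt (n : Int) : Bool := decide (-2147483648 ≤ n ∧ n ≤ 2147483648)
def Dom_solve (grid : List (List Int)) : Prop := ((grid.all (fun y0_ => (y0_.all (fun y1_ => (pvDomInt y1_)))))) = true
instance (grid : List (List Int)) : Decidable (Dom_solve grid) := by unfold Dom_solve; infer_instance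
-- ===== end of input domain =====

-- B replaces A's argmax-then-bidirectional-fill per line by elementwise min(prefix-max, suffix-max) and does
-- the column pass via transposition, on a copy (objective: simpler; A mutates its argument in place, B does not —
-- the equivalence proved is about the return value only).


-- ===== PORT A =====
-- grid[r][c] reads/writes as total getD/set: Pre_solve guarantees every index A uses is in range.
def pvGA (g : List (List Int)) (r c : Nat) : Int := (g.getD r []).getD c 0
def pvSetA (g : List (List Int)) (r c : Nat) (v : Int) : List (List Int) :=
  g.set r ((g.getD r []).set c v)

def solveGridA (g0 : List (List Int)) (n : Nat) : List (List Int) :=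
  let afterRows := (List.range n).foldl (fun g row =>
    let scan := (List.range n).foldl
        (fun (mi : Int × Nat) i => if pvGA g row i ≥ mi.1 then (pvGA g row i, i) else mi)
        (pvGA g row 0, 0)
    let indr := scan.2
    let back := (PySem.List.pyRange ((n : Int) - 1) (indr : Int) (-1)).foldl
        (fun (st : Int × List (List Int)) col =>
          let temp := max st.1 (pvGA st.2 row col.toNat)
          (temp, pvSetA st.2 row col.toNat temp))
        (pvGA g row (n - 1), g)
    let front := (PySem.List.pyRange 1 (indr : Int) 1).foldl
        (fun (st : Int × List (List Int)) col =>
          let temp := max st.1 (pvGA st.2 row col.toNat)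
          (temp, pvSetA st.2 row col.toNat temp))
        (pvGA back.2 row 0, back.2)
    front.2) g0
  (List.range n).foldl (fun g col =>
    let scan := (List.range n).foldl
        (fun (mi : Int × Nat) i => if pvGA g i col ≥ mi.1 then (pvGA g i col, i) else mi)
        (pvGA g 0 col, 0)
    let indc := scan.2
    let back := (PySem.List.pyRange ((n : Int) - 1) (indc : Int) (-1)).foldl
        (fun (st : Int × List (List Int)) row =>
          let temp := max st.1 (pvGA st.2 row.toNat col)
          (temp, pvSetA st.2 row.toNat col temp))
        (pvGA g (n - 1) col, g)
    let front := (PySem.List.pyRange 1 (indc : Int) 1).foldl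
        (fun (st : Int × List (List Int)) row =>
          let temp := max st.1 (pvGA st.2 row.toNat col)
          (temp, pvSetA st.2 row.toNat col temp))
        (pvGA back.2 0 col, back.2)
    front.2) afterRows

def solve (grid : List (List Int)) : Int :=
  let defaultMatrix := grid
  let n := grid.length
  let g1 := solveGridA grid n
  let g2 := solveGridA g1 n
  (List.range n).foldl (fun coins o =>
    (List.range n).foldl (fun coins i =>
      coins + (pvGA g2 o i - pvGA defaultMatrix o i)) coins) 0

-- ===== PORT B =====
def smoothAlt (line : List Int) : List Int :=
  let p := (line.foldl (fun (st : Int × List Int) x =>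
      (max st.1 x, st.2 ++ [max st.1 x])) (line.getD 0 0, [])).2
  let s := ((line.reverse).foldl (fun (st : Int × List Int) x =>
      (max st.1 x, st.2 ++ [max st.1 x])) (line.getD (line.length - 1) 0, [])).2.reverse
  List.zipWith min p s

def transposeAlt (g : List (List Int)) : List (List Int) :=
  match g with
  | [] => []
  | r0 :: rest =>
    let m := rest.foldl (fun acc r => min acc r.length) r0.length
    (List.range m).map (fun c => (r0 :: rest).map (fun r => r.getD c 0))

def stepAlt (g : List (List Int)) : List (List Int) :=
  transposeAlt ((transposeAlt (g.map smoothAlt)).map smoothAlt)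

def solve_alt (grid : List (List Int)) : Int :=
  let n := grid.length
  let g0 := grid.map (fun row => row.take n)
  let total0 := (g0.map (fun r => r.sum)).sum
  let g2 := stepAlt (stepAlt g0)
  (g2.map (fun r => r.sum)).sum - total0

-- ===== PRECONDITION & SPEC =====
-- A reads grid[r][i] for all r, i < len(grid): it raises IndexError when some row is shorter than
-- the number of rows; exactly those inputs are excluded.
def Pre_solve (grid : List (List Int)) : Prop := ∀ row ∈ grid, grid.length ≤ row.length
instance (grid : List (List Int)) : Decidable (Pre_solve grid) := by unfold Pre_solve; infer_instance
def pvWitness_solve : List (List Int) := [[1, 2], [3, 4]]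

def Spec_solve (grid : List (List Int)) (out : Int) : Prop := out = solve_alt grid
instance (grid : List (List Int)) (out : Int) : Decidable (Spec_solve grid out) := by unfold Spec_solve; infer_instance

-- ===== CLAIM (what is proved, stated in full; the proofs are below) =====
def Claim_equal_solve : Prop := ∀ (grid : List (List Int)), Dom_solve grid → Pre_solve grid → Spec_solve grid (solve grid)

-- ===== LEMMAS AND PROOFS =====

-- the common mathematical description of the per-line transform:
-- position i becomes min(max of l[0..i], max of l[i..])
def maxOf (l : List Int) : Int := l.foldl max (l.getD 0 0)
def tgt (l : List Int) (i : Nat) : Int := min (maxOf (l.take (i + 1))) (maxOf (l.drop i))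

-- A's per-line loops, extracted on a single list (the grid folds simulate them)
def scanA (l : List Int) (n : Nat) : Int × Nat :=
  (List.range n).foldl
    (fun (mi : Int × Nat) i => if l.getD i 0 ≥ mi.1 then (l.getD i 0, i) else mi)
    (l.getD 0 0, 0)

def lineStep (st : Int × List Int) (col : Int) : Int × List Int :=
  let temp := max st.1 (st.2.getD col.toNat 0)
  (temp, st.2.set col.toNat temp)

def lineA (l : List Int) (n : Nat) : List Int :=
  let j := (scanA l n).2
  let back := (PySem.List.pyRange ((n : Int) - 1) (j : Int) (-1)).foldl lineStep (l.getD (n - 1) 0, l)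
  let front := (PySem.List.pyRange 1 (j : Int) 1).foldl lineStep (back.2.getD 0 0, back.2)
  front.2

def getCol (g : List (List Int)) (c : Nat) : List Int := g.map (fun r => r.getD c 0)
def writeCol (g : List (List Int)) (c : Nat) (col : List Int) : List (List Int) :=
  g.mapIdx (fun i row => row.set c (col.getD i 0))
def Sq (g : List (List Int)) (n : Nat) : Prop := g.length = n ∧ ∀ r ∈ g, r.length = n
def WFg (g : List (List Int)) (n : Nat) : Prop := g.length = n ∧ ∀ r ∈ g, n ≤ r.length

lemma mem_le_maxOf (l : List Int) (y : Int) (hy : y ∈ l) : y ≤ maxOf l :=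
  (PySem.List.le_foldl_max l (l.getD 0 0)).2 y hy

lemma getD_le_maxOf (l : List Int) (i : Nat) (hi : i < l.length) : l.getD i 0 ≤ maxOf l := by
  rw [List.getD_eq_getElem l 0 hi]
  exact mem_le_maxOf l _ (l.getElem_mem hi)

lemma maxOf_le (l : List Int) (M : Int) (hne : l ≠ []) (h : ∀ i, i < l.length → l.getD i 0 ≤ M) :
    maxOf l ≤ M := by
  have h' : ∀ y ∈ l, y ≤ M := by
    intro y hy
    obtain ⟨i, hi, rfl⟩ := List.mem_iff_getElem.mp hy
    have := h i hi; rwa [List.getD_eq_getElem l 0 hi] at this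
  rcases PySem.List.foldl_max_mem l (l.getD 0 0) with h0 | h0
  · rw [maxOf, h0]
    have : 0 < l.length := List.length_pos_iff.mpr hne
    rw [List.getD_eq_getElem l 0 this]
    exact h' _ (l.getElem_mem this)
  · exact h' _ h0

lemma foldl_max_of_mem (l : List Int) (a : Int) (ha : a ∈ l) : l.foldl max a = maxOf l := by
  have hne : l ≠ [] := by rintro rfl; simp at ha
  have hpos : 0 < l.length := List.length_pos_iff.mpr hne
  apply le_antisymm
  · rcases PySem.List.foldl_max_mem l a with h0 | h0
    · rw [h0]; exact mem_le_maxOf l a ha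
    · exact mem_le_maxOf l _ h0
  · rcases PySem.List.foldl_max_mem l (l.getD 0 0) with h0 | h0
    · rw [maxOf, h0, List.getD_eq_getElem l 0 hpos]
      exact (PySem.List.le_foldl_max l a).2 _ (l.getElem_mem hpos)
    · exact (PySem.List.le_foldl_max l a).2 _ h0

lemma maxOf_eq_of (l : List Int) (M : Int) (j : Nat) (hj : j < l.length) (hjv : l.getD j 0 = M)
    (h : ∀ i, i < l.length → l.getD i 0 ≤ M) : maxOf l = M := by
  apply le_antisymm (maxOf_le l M (by intro h'; subst h'; simp at hj) h)
  rw [← hjv]; exact getD_le_maxOf l j hj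

lemma foldl_max_init (t : List Int) : ∀ a b : Int, t.foldl max (max a b) = max a (t.foldl max b) := by
  induction t with
  | nil => intro a b; simp
  | cons y t ih => intro a b; simp only [List.foldl_cons, max_assoc, ih]

lemma maxOf_cons (x : Int) (l : List Int) (h : l ≠ []) : maxOf (x :: l) = max x (maxOf l) := by
  obtain ⟨y, t, rfl⟩ := List.exists_cons_of_ne_nil h
  have h1 : maxOf (x :: y :: t) = t.foldl max (max x y) := by simp [maxOf]
  have h2 : maxOf (y :: t) = t.foldl max y := by simp [maxOf]
  rw [h1, h2, foldl_max_init]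

lemma maxOf_append_singleton (t : List Int) (x : Int) (h : t ≠ []) :
    maxOf (t ++ [x]) = max (maxOf t) x := by
  have hpos : 0 < t.length := List.length_pos_iff.mpr h
  have h0 : (t ++ [x]).getD 0 0 = t.getD 0 0 := by
    rw [List.getD_eq_getElem _ 0 (by simp), List.getD_eq_getElem t 0 hpos,
        List.getElem_append_left hpos]
  rw [maxOf, h0, List.foldl_append]
  simp [maxOf]

lemma maxOf_take_step (l : List Int) (i : Nat) (hi : i < l.length) (hi1 : 1 ≤ i) :
    maxOf (l.take (i + 1)) = max (maxOf (l.take i)) (l.getD i 0) := by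
  have ht : l.take (i + 1) = l.take i ++ [l[i]] := List.take_succ_eq_append_getElem hi
  have hne : l.take i ≠ [] := by
    have : (l.take i).length = min i l.length := List.length_take ..
    intro h; rw [h] at this; simp at this; omega
  rw [ht, List.getD_eq_getElem l 0 hi, maxOf_append_singleton _ _ hne]

lemma maxOf_drop_step (l : List Int) (i : Nat) (hi : i + 1 < l.length) :
    maxOf (l.drop i) = max (l.getD i 0) (maxOf (l.drop (i + 1))) := by
  have hii : i < l.length := by omega
  have hd : l.drop i = l[i] :: l.drop (i + 1) := List.drop_eq_getElem_cons hii
  have hne : l.drop (i + 1) ≠ [] := by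
    have : (l.drop (i+1)).length = l.length - (i+1) := List.length_drop ..
    intro h; rw [h] at this; simp at this; omega
  rw [hd, maxOf_cons _ _ hne, List.getD_eq_getElem l 0 hii]

lemma maxOf_singleton (x : Int) : maxOf [x] = x := by simp [maxOf]

lemma maxOf_take_one (l : List Int) (h : l ≠ []) : maxOf (l.take 1) = l.getD 0 0 := by
  rcases l with _ | ⟨x, t⟩
  · simp at h
  · simp [maxOf]

lemma getD_take (l : List Int) (n i : Nat) (h : i < n) : (l.take n).getD i 0 = l.getD i 0 := by
  simp [List.getD_eq_getElem?_getD, List.getElem?_take_of_lt h]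

lemma getD_drop (l : List Int) (c k : Nat) : (l.drop c).getD k 0 = l.getD (c + k) 0 := by
  simp [List.getD_eq_getElem?_getD, List.getElem?_drop]

lemma getD_set_ne (l : List Int) (i j : Nat) (v : Int) (h : i ≠ j) :
    (l.set i v).getD j 0 = l.getD j 0 := by
  simp [List.getD_eq_getElem?_getD, List.getElem?_set_ne h]

lemma getD_set_self (l : List Int) (i : Nat) (v : Int) (h : i < l.length) :
    (l.set i v).getD i 0 = v := by
  simp [List.getD_eq_getElem?_getD, h]

lemma scanA_succ (l : List Int) (k : Nat) :
    scanA l (k + 1) = (if l.getD k 0 ≥ (scanA l k).1 then (l.getD k 0, k) else scanA l k) := by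
  simp [scanA, List.range_succ, List.foldl_append]

lemma scanA_spec (l : List Int) (n : Nat) (hn : 1 ≤ n) :
    (scanA l n).2 < n ∧ l.getD (scanA l n).2 0 = (scanA l n).1 ∧
      ∀ i, i < n → l.getD i 0 ≤ (scanA l n).1 := by
  induction n with
  | zero => omega
  | succ k ih =>
    by_cases hk : 1 ≤ k
    · obtain ⟨h1, h2, h3⟩ := ih hk
      rw [scanA_succ]
      split_ifs with h
      · refine ⟨by omega, by simp, ?_⟩
        intro i hi
        rcases Nat.lt_succ_iff_lt_or_eq.mp hi with h' | h'
        · exact le_trans (h3 i h') h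
        · subst h'; simp
      · push Not at h
        exact ⟨by omega, h2, fun i hi => by
          rcases Nat.lt_succ_iff_lt_or_eq.mp hi with h' | h'
          · exact h3 i h'
          · subst h'; exact le_of_lt h⟩
    · have hk0 : k = 0 := by omega
      subst hk0
      rw [scanA_succ]
      simp [scanA]

lemma back_fold (l' : List Int) (j : Nat) :
    ∀ (a : Nat) (t : Int) (cur : List Int), j ≤ a → a < l'.length → l'.length ≤ cur.length →
      (∀ i, i ≤ a → cur.getD i 0 = l'.getD i 0) →
      max t (l'.getD a 0) = maxOf (l'.drop a) →
      let r := (PySem.List.pyRange (a : Int) (j : Int) (-1)).foldl lineStep (t, cur)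
      r.2.length = cur.length ∧
        (∀ i, i ≤ j → r.2.getD i 0 = cur.getD i 0) ∧
        (∀ i, j < i → i ≤ a → r.2.getD i 0 = maxOf (l'.drop i)) ∧
        (∀ i, a < i → r.2.getD i 0 = cur.getD i 0) := by
  intro a
  induction a with
  | zero =>
    intro t cur hja _ _ _ _
    have hj0 : j = 0 := by omega
    subst hj0
    rw [PySem.List.pyRange_neg_one_eq_nil (by simp)]
    exact ⟨rfl, fun _ _ => rfl, fun i h1 h2 => by omega, fun _ _ => rfl⟩
  | succ a ih =>
    intro t cur hja hal hlc hcur hinv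
    by_cases hj : j = a + 1
    · subst hj
      rw [PySem.List.pyRange_neg_one_eq_nil (by simp)]
      exact ⟨rfl, fun _ _ => rfl, fun i h1 h2 => by omega, fun _ _ => rfl⟩
    · have hj' : j ≤ a := by omega
      have hcons : PySem.List.pyRange ((a + 1 : Nat) : Int) (j : Int) (-1)
          = ((a + 1 : Nat) : Int) :: PySem.List.pyRange ((a : Nat) : Int) (j : Int) (-1) := by
        rw [PySem.List.pyRange_neg_one_cons (by exact_mod_cast Nat.lt_succ_of_le hj')]
        norm_num
      rw [hcons, List.foldl_cons]
      have hstep : lineStep (t, cur) ((a + 1 : Nat) : Int)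
          = (maxOf (l'.drop (a + 1)), cur.set (a + 1) (maxOf (l'.drop (a + 1)))) := by
        simp only [lineStep, Int.toNat_natCast]
        rw [hcur (a + 1) le_rfl, hinv]
      rw [hstep]
      have hset : ∀ i, i ≤ a → (cur.set (a + 1) (maxOf (l'.drop (a + 1)))).getD i 0 = l'.getD i 0 := by
        intro i hi
        rw [getD_set_ne _ _ _ _ (by omega)]
        exact hcur i (by omega)
      have hinv' : max (maxOf (l'.drop (a + 1))) (l'.getD a 0) = maxOf (l'.drop a) := by
        rw [maxOf_drop_step l' a hal, max_comm]
      obtain ⟨c1, c2, c3, c4⟩ := ih (maxOf (l'.drop (a + 1))) (cur.set (a + 1) (maxOf (l'.drop (a + 1))))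
        hj' (by omega) (by simpa using hlc) hset hinv'
      refine ⟨by simpa using c1, ?_, ?_, ?_⟩
      · intro i hi
        rw [c2 i hi, getD_set_ne _ _ _ _ (by omega)]
      · intro i h1 h2
        rcases Nat.lt_succ_iff_lt_or_eq.mp (Nat.lt_succ_of_le h2) with h' | h'
        · rcases Nat.lt_or_ge a i with ha' | ha'
          · have : i = a + 1 := by omega
            omega
          · exact c3 i h1 ha'
        · subst h'
          rw [c4 (a + 1) (by omega), getD_set_self _ _ _ (by omega)]
      · intro i hi
        rw [c4 i (by omega), getD_set_ne _ _ _ _ (by omega)]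

lemma front_fold (l' : List Int) (j : Nat) (hj : j ≤ l'.length) :
    ∀ (d a : Nat) (t : Int) (cur : List Int), j - a = d → 1 ≤ a → a ≤ j → l'.length ≤ cur.length →
      (∀ i, a ≤ i → i < j → cur.getD i 0 = l'.getD i 0) →
      t = maxOf (l'.take a) →
      let r := (PySem.List.pyRange (a : Int) (j : Int) 1).foldl lineStep (t, cur)
      r.2.length = cur.length ∧
        (∀ i, i < a → r.2.getD i 0 = cur.getD i 0) ∧
        (∀ i, a ≤ i → i < j → r.2.getD i 0 = maxOf (l'.take (i + 1))) ∧
        (∀ i, j ≤ i → r.2.getD i 0 = cur.getD i 0) := by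
  intro d
  induction d with
  | zero =>
    intro a t cur hd ha1 haj _ _ _
    have : j = a := by omega
    subst this
    rw [PySem.List.pyRange_one_eq_nil (by simp)]
    exact ⟨rfl, fun _ _ => rfl, fun i h1 h2 => by omega, fun _ _ => rfl⟩
  | succ d ih =>
    intro a t cur hd ha1 haj hlc hcur ht
    have haj' : a < j := by omega
    have hal : a < l'.length := by omega
    have hcons : PySem.List.pyRange ((a : Nat) : Int) (j : Int) 1
        = ((a : Nat) : Int) :: PySem.List.pyRange ((a + 1 : Nat) : Int) (j : Int) 1 := by
      rw [PySem.List.pyRange_one_cons (by exact_mod_cast haj')]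
      norm_num
    rw [hcons, List.foldl_cons]
    have hstep : lineStep (t, cur) ((a : Nat) : Int)
        = (maxOf (l'.take (a + 1)), cur.set a (maxOf (l'.take (a + 1)))) := by
      simp only [lineStep, Int.toNat_natCast]
      rw [hcur a le_rfl haj', ht, ← maxOf_take_step l' a hal ha1]
    rw [hstep]
    obtain ⟨c1, c2, c3, c4⟩ := ih (a + 1) (maxOf (l'.take (a + 1)))
      (cur.set a (maxOf (l'.take (a + 1)))) (by omega) (by omega) (by omega) (by simpa using hlc)
      (fun i hi1 hi2 => by rw [getD_set_ne _ _ _ _ (by omega)]; exact hcur i (by omega) hi2) rfl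
    refine ⟨by simpa using c1, ?_, ?_, ?_⟩
    · intro i hi
      rw [c2 i (by omega), getD_set_ne _ _ _ _ (by omega)]
    · intro i h1 h2
      rcases Nat.eq_or_lt_of_le h1 with h' | h'
      · have hia : i = a := h'.symm
        subst hia
        rw [c2 i (by omega), getD_set_self _ _ _ (by omega)]
      · exact c3 i (by omega) h2
    · intro i hi
      rw [c4 i hi, getD_set_ne _ _ _ _ (by omega)]

lemma foldl_lineStep_length (L : List Int) : ∀ (st : Int × List Int),
    ((L.foldl lineStep st).2).length = st.2.length := by
  induction L with
  | nil => intro st; rfl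
  | cons x L ih => intro st; rw [List.foldl_cons, ih]; simp [lineStep]

lemma lineA_length (l : List Int) (n : Nat) : (lineA l n).length = l.length := by
  simp [lineA, foldl_lineStep_length]

lemma lineA_char (l : List Int) (n : Nat) (hn : 1 ≤ n) (hl : n ≤ l.length) :
    ∀ c, c < n → (lineA l n).getD c 0 = tgt (l.take n) c := by
  set l' : List Int := l.take n with hl'
  have hlen' : l'.length = n := by simp [hl', List.length_take]; omega
  have hgd : ∀ i, i < n → l'.getD i 0 = l.getD i 0 := fun i hi => getD_take l n i hi
  obtain ⟨hj1, hj2, hj3⟩ := scanA_spec l n hn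
  set j := (scanA l n).2 with hjdef
  set M := (scanA l n).1 with hMdef
  -- facts about M on l'
  have hub : ∀ i, i < l'.length → l'.getD i 0 ≤ M := by
    intro i hi; rw [hgd i (by omega)]; exact hj3 i (by omega)
  have hjM : l'.getD j 0 = M := by rw [hgd j hj1]; exact hj2
  -- the back fold
  have hcast : ((n : Int) - 1) = (((n - 1 : Nat)) : Int) := by omega
  have hdropn1 : max (l.getD (n - 1) 0) (l'.getD (n - 1) 0) = maxOf (l'.drop (n - 1)) := by
    have h1 : n - 1 < l'.length := by omega
    have hx : l'[n - 1] = l'.getD (n - 1) 0 := (List.getD_eq_getElem l' 0 h1).symm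
    have hd : l'.drop (n - 1) = [l'.getD (n - 1) 0] := by
      rw [List.drop_eq_getElem_cons h1, List.drop_eq_nil_of_le (by omega), hx]
    rw [hd, maxOf_singleton, hgd (n - 1) (by omega), max_self]
  obtain ⟨b1, b2, b3, b4⟩ := back_fold l' j (n - 1) (l.getD (n - 1) 0) l (by omega)
    (by rw [hlen']; omega) (by rw [hlen']; exact hl) (fun i hi => (hgd i (by omega)).symm) hdropn1
  set bk := (PySem.List.pyRange (((n - 1 : Nat)) : Int) (j : Int) (-1)).foldl lineStep
    (l.getD (n - 1) 0, l) with hbk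
  -- tgt values
  have hne' : l' ≠ [] := by
    intro h; rw [h] at hlen'; simp at hlen'; omega
  have take_ne : ∀ c : Nat, l'.take (c + 1) ≠ [] := by
    intro c h
    rcases List.take_eq_nil_iff.mp h with h' | h'
    · omega
    · exact hne' h'
  have drop_ne : ∀ c : Nat, c < n → l'.drop c ≠ [] := by
    intro c hc h
    have := List.drop_eq_nil_iff.mp h
    omega
  have hTakeM : ∀ c, j ≤ c → c < n → maxOf (l'.take (c + 1)) = M := by
    intro c hjc hcn
    apply maxOf_eq_of _ _ j
    · simp [List.length_take]; omega
    · rw [getD_take _ _ _ (by omega)]; exact hjM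
    · intro i hi
      simp [List.length_take] at hi
      rw [getD_take _ _ _ (by omega)]
      exact hub i (by omega)
  have hDropM : ∀ c, c ≤ j → maxOf (l'.drop c) = M := by
    intro c hcj
    apply maxOf_eq_of _ _ (j - c)
    · simp [List.length_drop]; omega
    · rw [getD_drop]
      have : c + (j - c) = j := by omega
      rw [this]; exact hjM
    · intro i hi
      simp [List.length_drop] at hi
      rw [getD_drop]
      exact hub (c + i) (by omega)
  have hTakeLe : ∀ c : Nat, c < n → maxOf (l'.take (c + 1)) ≤ M := by
    intro c hc
    apply maxOf_le _ _ (take_ne c)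
    intro i hi
    simp [List.length_take] at hi
    rw [getD_take _ _ _ (by omega)]
    exact hub i (by omega)
  have hDropLe : ∀ c : Nat, c < n → maxOf (l'.drop c) ≤ M := by
    intro c hc
    apply maxOf_le _ _ (drop_ne c hc)
    intro i hi
    simp [List.length_drop] at hi
    rw [getD_drop]
    exact hub (c + i) (by omega)
  -- now split on j
  by_cases hj0 : j = 0
  · -- front loop is empty
    intro c hc
    have hfront : PySem.List.pyRange 1 ((j : Nat) : Int) 1 = [] := by
      apply PySem.List.pyRange_one_eq_nil; omega
    simp only [lineA]
    rw [hcast, ← hbk, hfront]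
    simp only [List.foldl_nil]
    rcases Nat.eq_zero_or_pos c with hc0 | hc0
    · subst hc0
      rw [b2 0 (by omega), ← hgd 0 hn, tgt, List.drop_zero, maxOf_take_one l' hne']
      exact (min_eq_left (getD_le_maxOf l' 0 (by omega))).symm
    · rw [b3 c (by omega) (by omega), tgt]
      have hle : maxOf (l'.drop c) ≤ maxOf (l'.take (c + 1)) := by
        rw [hTakeM c (by omega) hc]; exact hDropLe c hc
      exact (min_eq_right hle).symm
  · -- j ≥ 1 : run the front fold
    have hj1' : 1 ≤ j := by omega
    have hne' : l' ≠ [] := by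
      intro h; rw [h] at hlen'; simp at hlen'; omega
    have ht0 : bk.2.getD 0 0 = maxOf (l'.take 1) := by
      rw [b2 0 (by omega), ← hgd 0 hn, maxOf_take_one l' hne']
    obtain ⟨f1, f2, f3, f4⟩ := front_fold l' j (by omega) (j - 1) 1 (bk.2.getD 0 0) bk.2 rfl
      le_rfl hj1' (by rw [b1, hlen']; exact hl)
      (fun i hi1 hi2 => by rw [b2 i (by omega)]; exact (hgd i (by omega)).symm) ht0
    simp only [Nat.cast_one] at f1 f2 f3 f4
    intro c hc
    simp only [lineA]
    rw [hcast, ← hbk]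
    rcases Nat.eq_zero_or_pos c with hc0 | hc0
    · subst hc0
      rw [f2 0 (by omega), b2 0 (by omega), ← hgd 0 hn, tgt, List.drop_zero, maxOf_take_one l' hne']
      exact (min_eq_left (getD_le_maxOf l' 0 (by omega))).symm
    · rcases Nat.lt_trichotomy c j with hcj | hcj | hcj
      · rw [f3 c (by omega) hcj, tgt, min_eq_left]
        rw [hDropM c (by omega)]
        exact hTakeLe c hc
      · rw [f4 c (by omega), b2 c (by omega), ← hgd c hc, tgt, hTakeM c (by omega) hc,
          hDropM c (by omega), min_self, hcj]
        exact hjM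
      · rw [f4 c (by omega), b3 c hcj (by omega), tgt, min_eq_right]
        rw [hTakeM c (by omega) hc]
        exact hDropLe c hc

def runMax (m : Int) : List Int → List Int
  | [] => []
  | x :: t => max m x :: runMax (max m x) t

lemma foldl_max_reverse (t : List Int) : ∀ m : Int, t.reverse.foldl max m = t.foldl max m := by
  induction t with
  | nil => intro m; simp
  | cons x t ih =>
    intro m
    rw [List.reverse_cons, List.foldl_append, ih]
    simp only [List.foldl_cons, List.foldl_nil]
    have h1 : t.foldl max (max m x) = max x (t.foldl max m) := by
      rw [max_comm m x]; exact foldl_max_init t x m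
    rw [h1]
    exact max_comm _ _

lemma mfold_spec (L : List Int) : ∀ (m : Int) (acc : List Int),
    L.foldl (fun (st : Int × List Int) x => (max st.1 x, st.2 ++ [max st.1 x])) (m, acc)
      = (L.foldl max m, acc ++ runMax m L) := by
  induction L with
  | nil => intro m acc; simp [runMax]
  | cons x t ih => intro m acc; simp [List.foldl_cons, ih, runMax]

lemma runMax_length (L : List Int) : ∀ m, (runMax m L).length = L.length := by
  induction L with
  | nil => intro m; rfl
  | cons x t ih => intro m; simp [runMax, ih]

lemma runMax_getD (L : List Int) : ∀ (m : Int) (i : Nat), i < L.length →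
    (runMax m L).getD i 0 = (L.take (i + 1)).foldl max m := by
  induction L with
  | nil => intro m i hi; simp at hi
  | cons x t ih =>
    intro m i hi
    cases i with
    | zero => simp [runMax]
    | succ i =>
      simp only [runMax, List.getD_cons_succ, List.take_succ_cons, List.foldl_cons]
      exact ih (max m x) i (by simpa using hi)

lemma smoothAlt_eq (l : List Int) : smoothAlt l
    = List.zipWith min (runMax (l.getD 0 0) l)
        ((runMax (l.getD (l.length - 1) 0) l.reverse).reverse) := by
  simp only [smoothAlt]
  rw [mfold_spec, mfold_spec]
  simp

lemma smoothAlt_length (l : List Int) : (smoothAlt l).length = l.length := by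
  rw [smoothAlt_eq]
  simp [runMax_length]

lemma smoothAlt_getD (l : List Int) (i : Nat) (hi : i < l.length) :
    (smoothAlt l).getD i 0 = tgt l i := by
  have hp : (runMax (l.getD 0 0) l).length = l.length := runMax_length l _
  have hs : ((runMax (l.getD (l.length - 1) 0) l.reverse).reverse).length = l.length := by
    simp [runMax_length]
  rw [smoothAlt_eq]
  rw [List.getD_eq_getElem _ 0 (by rw [List.length_zipWith, hp, hs]; omega)]
  rw [List.getElem_zipWith]
  rw [← List.getD_eq_getElem (runMax (l.getD 0 0) l) 0, ← List.getD_eq_getElem _ 0]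
  -- p side
  have hpv : (runMax (l.getD 0 0) l).getD i 0 = maxOf (l.take (i + 1)) := by
    rw [runMax_getD l _ i hi]
    apply foldl_max_of_mem
    have h0 : (l.take (i + 1)).getD 0 0 = l.getD 0 0 := getD_take l (i + 1) 0 (by omega)
    rw [← h0]
    have hlen : 0 < (l.take (i + 1)).length := by
      rw [List.length_take]; omega
    rw [List.getD_eq_getElem _ 0 hlen]
    exact List.getElem_mem hlen
  -- s side
  have hsv : ((runMax (l.getD (l.length - 1) 0) l.reverse).reverse).getD i 0 = maxOf (l.drop i) := by
    rw [List.getD_eq_getElem _ 0 (by rw [hs]; omega), List.getElem_reverse,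
      ← List.getD_eq_getElem _ 0]
    rw [runMax_length]
    have hil : l.reverse.length - 1 - i < l.reverse.length := by simp; omega
    rw [runMax_getD _ _ _ (by simpa using hil)]
    have hk : l.reverse.length - 1 - i + 1 = l.length - i := by simp; omega
    rw [show l.reverse.length - 1 - i + 1 = l.length - i by simp; omega]
    have htr : l.reverse.take (l.length - i) = (l.drop i).reverse := by
      rw [List.take_reverse]
      have hh : l.length - (l.length - i) = i := by omega
      rw [hh]
    rw [htr, foldl_max_reverse]
    apply foldl_max_of_mem
    have hx : (l.drop i).getD (l.length - i - 1) 0 = l.getD (l.length - 1) 0 := by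
      rw [getD_drop]
      congr 1
      omega
    rw [← hx]
    have hlen : l.length - i - 1 < (l.drop i).length := by
      rw [List.length_drop]; omega
    rw [List.getD_eq_getElem _ 0 hlen]
    exact List.getElem_mem hlen
  rw [hpv, hsv, tgt]

lemma getDl_set_ne {α : Type} (l : List α) (d : α) (i j : Nat) (v : α) (h : i ≠ j) :
    (l.set i v).getD j d = l.getD j d := by
  simp [List.getD_eq_getElem?_getD, List.getElem?_set_ne h]

lemma getDl_set_self {α : Type} (l : List α) (d : α) (i : Nat) (v : α) (h : i < l.length) :
    (l.set i v).getD i d = v := by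
  simp [List.getD_eq_getElem?_getD, h]

lemma set_getD_cancel (g : List (List Int)) (r : Nat) : g.set r (g.getD r []) = g := by
  rcases Nat.lt_or_ge r g.length with h | h
  · rw [List.getD_eq_getElem g [] h, List.set_getElem_self]
  · exact List.set_eq_of_length_le h

lemma row_sim (r : Nat) (L : List Int) (g : List (List Int)) (hr : r < g.length) :
    ∀ (c : List Int) (t : Int),
      L.foldl (fun (st : Int × List (List Int)) col =>
          let temp := max st.1 (pvGA st.2 r col.toNat)
          (temp, pvSetA st.2 r col.toNat temp)) (t, g.set r c)
      = ((L.foldl lineStep (t, c)).1, g.set r (L.foldl lineStep (t, c)).2) := by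
  induction L with
  | nil => intro c t; simp
  | cons x L ih =>
    intro c t
    have hread : pvGA (g.set r c) r x.toNat = c.getD x.toNat 0 := by
      rw [pvGA, getDl_set_self _ _ _ _ hr]
    have hwrite : ∀ v, pvSetA (g.set r c) r x.toNat v = g.set r (c.set x.toNat v) := by
      intro v
      rw [pvSetA, getDl_set_self _ _ _ _ hr, List.set_set]
    simp only [List.foldl_cons]
    rw [show (let temp := max t (pvGA (g.set r c) r x.toNat)
        (temp, pvSetA (g.set r c) r x.toNat temp))
      = (max t (c.getD x.toNat 0), g.set r (c.set x.toNat (max t (c.getD x.toNat 0)))) by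
        simp only [hread, hwrite]]
    rw [ih]
    rfl

lemma rowstep_eq (g : List (List Int)) (n row : Nat) (hr : row < g.length) :
    (let scan := (List.range n).foldl
        (fun (mi : Int × Nat) i => if pvGA g row i ≥ mi.1 then (pvGA g row i, i) else mi)
        (pvGA g row 0, 0)
    let indr := scan.2
    let back := (PySem.List.pyRange ((n : Int) - 1) (indr : Int) (-1)).foldl
        (fun (st : Int × List (List Int)) col =>
          let temp := max st.1 (pvGA st.2 row col.toNat)
          (temp, pvSetA st.2 row col.toNat temp))
        (pvGA g row (n - 1), g)
    let front := (PySem.List.pyRange 1 (indr : Int) 1).foldl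
        (fun (st : Int × List (List Int)) col =>
          let temp := max st.1 (pvGA st.2 row col.toNat)
          (temp, pvSetA st.2 row col.toNat temp))
        (pvGA back.2 row 0, back.2)
    front.2)
    = g.set row (lineA (g.getD row []) n) := by
  have hscan : (List.range n).foldl
      (fun (mi : Int × Nat) i => if pvGA g row i ≥ mi.1 then (pvGA g row i, i) else mi)
      (pvGA g row 0, 0) = scanA (g.getD row []) n := rfl
  simp only [hscan]
  have hback := row_sim row (PySem.List.pyRange ((n : Int) - 1) ((scanA (g.getD row []) n).2 : Int) (-1))
    g hr (g.getD row []) (pvGA g row (n - 1))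
  rw [set_getD_cancel] at hback
  simp only [hback]
  have hfr0 : pvGA (g.set row ((PySem.List.pyRange ((n : Int) - 1) ((scanA (g.getD row []) n).2 : Int) (-1)).foldl
      lineStep (pvGA g row (n - 1), g.getD row [])).2) row 0
      = ((PySem.List.pyRange ((n : Int) - 1) ((scanA (g.getD row []) n).2 : Int) (-1)).foldl
      lineStep (pvGA g row (n - 1), g.getD row [])).2.getD 0 0 := by
    rw [pvGA, getDl_set_self _ _ _ _ hr]
  simp only [hfr0]
  rw [row_sim row _ g hr]
  rfl

lemma rowpass_partial (g : List (List Int)) (n : Nat) (hgl : g.length = n) :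
    ∀ k, k ≤ n →
      let R := (List.range k).foldl (fun g row =>
        let scan := (List.range n).foldl
            (fun (mi : Int × Nat) i => if pvGA g row i ≥ mi.1 then (pvGA g row i, i) else mi)
            (pvGA g row 0, 0)
        let indr := scan.2
        let back := (PySem.List.pyRange ((n : Int) - 1) (indr : Int) (-1)).foldl
            (fun (st : Int × List (List Int)) col =>
              let temp := max st.1 (pvGA st.2 row col.toNat)
              (temp, pvSetA st.2 row col.toNat temp))
            (pvGA g row (n - 1), g)
        let front := (PySem.List.pyRange 1 (indr : Int) 1).foldl
            (fun (st : Int × List (List Int)) col =>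
              let temp := max st.1 (pvGA st.2 row col.toNat)
              (temp, pvSetA st.2 row col.toNat temp))
            (pvGA back.2 row 0, back.2)
        front.2) g
      R.length = n ∧ (∀ i, k ≤ i → R.getD i [] = g.getD i []) ∧
        (∀ i, i < k → R.getD i [] = lineA (g.getD i []) n) := by
  intro k
  induction k with
  | zero =>
    intro _
    exact ⟨hgl, fun _ _ => rfl, fun i hi => by omega⟩
  | succ k ih =>
    intro hk
    obtain ⟨c1, c2, c3⟩ := ih (by omega)
    simp only [List.range_succ, List.foldl_append, List.foldl_cons, List.foldl_nil]
    set R := (List.range k).foldl _ g with hR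
    rw [rowstep_eq _ n k (by rw [c1]; omega)]
    refine ⟨by simpa using c1, ?_, ?_⟩
    · intro i hi
      rw [getDl_set_ne _ _ _ _ _ (by omega)]
      exact c2 i (by omega)
    · intro i hi
      rcases Nat.lt_succ_iff_lt_or_eq.mp hi with h' | h'
      · rw [getDl_set_ne _ _ _ _ _ (by omega)]
        exact c3 i h'
      · subst h'
        rw [getDl_set_self _ _ _ _ (by rw [c1]; omega), c2 i le_rfl]

lemma getCol_getD (g : List (List Int)) (c i : Nat) : (getCol g c).getD i 0 = pvGA g i c := by
  rcases Nat.lt_or_ge i g.length with h | h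
  · rw [getCol, pvGA, List.getD_eq_getElem _ 0 (by simpa using h), List.getElem_map,
      List.getD_eq_getElem g [] h]
  · rw [getCol, pvGA, List.getD_eq_default _ 0 (by simpa using h), List.getD_eq_default g [] h]
    simp

lemma writeCol_getD (g : List (List Int)) (c : Nat) (col : List Int) (i : Nat) (hi : i < g.length) :
    (writeCol g c col).getD i [] = (g.getD i []).set c (col.getD i 0) := by
  rw [writeCol, List.getD_eq_getElem _ [] (by simpa using hi), List.getElem_mapIdx,
    List.getD_eq_getElem g [] hi]

lemma writeCol_length (g : List (List Int)) (c : Nat) (col : List Int) :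
    (writeCol g c col).length = g.length := by simp [writeCol]

lemma writeCol_getCol (g : List (List Int)) (c : Nat) : writeCol g c (getCol g c) = g := by
  apply List.ext_getElem (by simp [writeCol])
  intro i h1 h2
  simp only [writeCol]
  rw [List.getElem_mapIdx]
  have : (getCol g c).getD i 0 = (g[i]).getD c 0 := by
    rw [getCol, List.getD_eq_getElem _ 0 (by simpa using h2), List.getElem_map]
  rw [this]
  rcases Nat.lt_or_ge c (g[i]).length with h | h
  · rw [List.getD_eq_getElem _ 0 h, List.set_getElem_self]
  · exact List.set_eq_of_length_le h

lemma writeCol_set (g : List (List Int)) (c : Nat) (col : List Int) (x : Nat) (v : Int)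
    (hx : x < g.length) (hxc : x < col.length) :
    (writeCol g c col).set x (((writeCol g c col).getD x []).set c v)
      = writeCol g c (col.set x v) := by
  apply List.ext_getElem (by simp [writeCol])
  intro i h1 h2
  rcases eq_or_ne i x with rfl | hne
  · rw [List.getElem_set_self, writeCol_getD _ _ _ _ hx, List.set_set]
    simp only [writeCol]
    rw [List.getElem_mapIdx, List.getD_eq_getElem g [] hx, getDl_set_self _ _ _ _ hxc]
  · rw [List.getElem_set_ne (by omega)]
    simp only [writeCol]
    rw [List.getElem_mapIdx, List.getElem_mapIdx]
    congr 1
    rw [getDl_set_ne _ _ _ _ _ (by omega)]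

lemma col_sim (c : Nat) (L : List Int) (g : List (List Int))
    (hrl : ∀ i, i < g.length → c < (g.getD i []).length)
    (hL : ∀ x ∈ L, 0 ≤ x ∧ x.toNat < g.length) :
    ∀ (col : List Int) (t : Int), col.length = g.length →
      L.foldl (fun (st : Int × List (List Int)) row =>
          let temp := max st.1 (pvGA st.2 row.toNat c)
          (temp, pvSetA st.2 row.toNat c temp)) (t, writeCol g c col)
      = ((L.foldl lineStep (t, col)).1, writeCol g c (L.foldl lineStep (t, col)).2) := by
  induction L with
  | nil => intro col t _; simp
  | cons x L ih =>
    intro col t hcol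
    obtain ⟨hx0, hxl⟩ := hL x List.mem_cons_self
    have hread : pvGA (writeCol g c col) x.toNat c = col.getD x.toNat 0 := by
      rw [pvGA, writeCol_getD _ _ _ _ hxl, getDl_set_self _ _ _ _ (hrl x.toNat hxl)]
    have hwrite : ∀ v, pvSetA (writeCol g c col) x.toNat c v = writeCol g c (col.set x.toNat v) := by
      intro v
      rw [pvSetA, writeCol_set _ _ _ _ _ hxl (by omega)]
    simp only [List.foldl_cons]
    rw [show (let temp := max t (pvGA (writeCol g c col) x.toNat c)
        (temp, pvSetA (writeCol g c col) x.toNat c temp))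
      = (max t (col.getD x.toNat 0), writeCol g c (col.set x.toNat (max t (col.getD x.toNat 0)))) by
        simp only [hread, hwrite]]
    rw [ih (fun y hy => hL y (List.mem_cons_of_mem x hy)) _ _ (by simpa using hcol)]
    rfl

lemma colstep_eq (g : List (List Int)) (n c : Nat) (hn : 1 ≤ n) (hgl : g.length = n)
    (hrl : ∀ i, i < g.length → c < (g.getD i []).length) :
    (let scan := (List.range n).foldl
        (fun (mi : Int × Nat) i => if pvGA g i c ≥ mi.1 then (pvGA g i c, i) else mi)
        (pvGA g 0 c, 0)
    let indc := scan.2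
    let back := (PySem.List.pyRange ((n : Int) - 1) (indc : Int) (-1)).foldl
        (fun (st : Int × List (List Int)) row =>
          let temp := max st.1 (pvGA st.2 row.toNat c)
          (temp, pvSetA st.2 row.toNat c temp))
        (pvGA g (n - 1) c, g)
    let front := (PySem.List.pyRange 1 (indc : Int) 1).foldl
        (fun (st : Int × List (List Int)) row =>
          let temp := max st.1 (pvGA st.2 row.toNat c)
          (temp, pvSetA st.2 row.toNat c temp))
        (pvGA back.2 0 c, back.2)
    front.2)
    = writeCol g c (lineA (getCol g c) n) := by
  have hscan : (List.range n).foldl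
      (fun (mi : Int × Nat) i => if pvGA g i c ≥ mi.1 then (pvGA g i c, i) else mi)
      (pvGA g 0 c, 0) = scanA (getCol g c) n := by
    unfold scanA
    simp only [getCol_getD]
  simp only [hscan]
  set j := (scanA (getCol g c) n).2 with hj
  have hjn : j < n := (scanA_spec _ n hn).1
  have hcollen : (getCol g c).length = g.length := by simp [getCol]
  have hback := col_sim c (PySem.List.pyRange ((n : Int) - 1) (j : Int) (-1)) g hrl
    (by
      intro x hx
      rw [PySem.List.mem_pyRange_neg_one] at hx
      constructor
      · omega
      · omega)
    (getCol g c) (pvGA g (n - 1) c) hcollen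
  rw [writeCol_getCol] at hback
  have hinit : pvGA g (n - 1) c = (getCol g c).getD (n - 1) 0 := (getCol_getD g c (n - 1)).symm
  rw [hinit] at hback ⊢
  simp only [hback]
  set bl := (PySem.List.pyRange ((n : Int) - 1) (j : Int) (-1)).foldl lineStep
    ((getCol g c).getD (n - 1) 0, getCol g c) with hbl
  have hfr0 : pvGA (writeCol g c bl.2) 0 c = bl.2.getD 0 0 := by
    rw [pvGA, writeCol_getD _ _ _ _ (by omega), getDl_set_self _ _ _ _ (hrl 0 (by omega))]
  rw [hfr0]
  have hbllen : bl.2.length = g.length := by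
    rw [hbl, foldl_lineStep_length]; exact hcollen
  have hfront := col_sim c (PySem.List.pyRange 1 (j : Int) 1) g hrl
    (by
      intro x hx
      rw [PySem.List.mem_pyRange_one] at hx
      constructor
      · omega
      · omega)
    bl.2 (bl.2.getD 0 0) hbllen
  rw [hfront]
  rfl

lemma colpass_partial (g : List (List Int)) (n : Nat) (hgl : g.length = n)
    (hrow : ∀ i, i < n → n ≤ (g.getD i []).length) :
    ∀ k, k ≤ n →
      let R := (List.range k).foldl (fun g col =>
        let scan := (List.range n).foldl
            (fun (mi : Int × Nat) i => if pvGA g i col ≥ mi.1 then (pvGA g i col, i) else mi)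
            (pvGA g 0 col, 0)
        let indc := scan.2
        let back := (PySem.List.pyRange ((n : Int) - 1) (indc : Int) (-1)).foldl
            (fun (st : Int × List (List Int)) row =>
              let temp := max st.1 (pvGA st.2 row.toNat col)
              (temp, pvSetA st.2 row.toNat col temp))
            (pvGA g (n - 1) col, g)
        let front := (PySem.List.pyRange 1 (indc : Int) 1).foldl
            (fun (st : Int × List (List Int)) row =>
              let temp := max st.1 (pvGA st.2 row.toNat col)
              (temp, pvSetA st.2 row.toNat col temp))
            (pvGA back.2 0 col, back.2)
        front.2) g
      R.length = n ∧ (∀ i, (R.getD i []).length = (g.getD i []).length) ∧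
        (∀ i d, k ≤ d → pvGA R i d = pvGA g i d) ∧
        (∀ i d, i < n → d < k → pvGA R i d = (lineA (getCol g d) n).getD i 0) := by
  intro k
  induction k with
  | zero =>
    intro _
    exact ⟨hgl, fun _ => rfl, fun _ _ _ => rfl, fun i d _ hd => by omega⟩
  | succ k ih =>
    intro hk
    obtain ⟨c1, c2, c3, c4⟩ := ih (by omega)
    simp only [List.range_succ, List.foldl_append, List.foldl_cons, List.foldl_nil]
    set R := (List.range k).foldl _ g with hR
    have hn1 : 1 ≤ n := by omega
    have hrl : ∀ i, i < R.length → k < (R.getD i []).length := by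
      intro i hi
      rw [c2 i]
      have := hrow i (by omega)
      omega
    rw [colstep_eq R n k hn1 c1 hrl]
    have hcoleq : getCol R k = getCol g k := by
      apply List.ext_getElem (by simp [getCol, c1, hgl])
      intro i h1 h2
      have hi : i < n := by simpa [getCol, c1] using h1
      have e1 : (getCol R k)[i] = (getCol R k).getD i 0 := (List.getD_eq_getElem _ 0 h1).symm
      have e2 : (getCol g k)[i] = (getCol g k).getD i 0 := (List.getD_eq_getElem _ 0 h2).symm
      rw [e1, e2, getCol_getD, getCol_getD]
      exact c3 i k le_rfl
    rw [hcoleq]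
    refine ⟨by rw [writeCol_length]; exact c1, ?_, ?_, ?_⟩
    · intro i
      rcases Nat.lt_or_ge i R.length with h | h
      · rw [writeCol_getD _ _ _ _ h, List.length_set, c2 i]
      · rw [List.getD_eq_default _ [] (by rw [writeCol_length]; omega),
          List.getD_eq_default _ [] (by omega)]
    · intro i d hd
      rcases Nat.lt_or_ge i R.length with h | h
      · rw [pvGA, writeCol_getD _ _ _ _ h, getDl_set_ne _ _ _ _ _ (by omega)]
        exact c3 i d (by omega)
      · rw [pvGA, List.getD_eq_default _ [] (by rw [writeCol_length]; omega)]
        rw [← c3 i d (by omega), pvGA, List.getD_eq_default _ [] (by omega)]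
    · intro i d hi hd
      rcases Nat.lt_succ_iff_lt_or_eq.mp hd with h' | h'
      · rw [pvGA, writeCol_getD _ _ _ _ (by rw [c1]; omega), getDl_set_ne _ _ _ _ _ (by omega)]
        exact c4 i d hi h'
      · subst h'
        rw [pvGA, writeCol_getD _ _ _ _ (by rw [c1]; omega),
          getDl_set_self _ _ _ _ (by
            have := hrl i (by rw [c1]; omega)
            omega)]

lemma solveGridA_spec (g : List (List Int)) (n : Nat) (hgl : g.length = n)
    (hrow : ∀ i, i < n → n ≤ (g.getD i []).length) :
    (solveGridA g n).length = n ∧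
      (∀ i, ((solveGridA g n).getD i []).length = (g.getD i []).length) ∧
      ∀ i c, i < n → c < n →
        pvGA (solveGridA g n) i c
          = (lineA (getCol (g.map (fun r => lineA r n)) c) n).getD i 0 := by
  obtain ⟨r1, r2, r3⟩ := rowpass_partial g n hgl n le_rfl
  set R1 := (List.range n).foldl _ g with hR1
  have rlen : ∀ i, (R1.getD i []).length = (g.getD i []).length := by
    intro i
    rcases Nat.lt_or_ge i n with h | h
    · rw [r3 i h, lineA_length]
    · rw [r2 i h]
  obtain ⟨q1, q2, q3, q4⟩ := colpass_partial R1 n r1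
    (fun i hi => by rw [rlen i]; exact hrow i hi) n le_rfl
  have hcols : ∀ c, c < n → getCol R1 c = getCol (g.map (fun r => lineA r n)) c := by
    intro c hc
    apply List.ext_getElem (by simp [getCol, r1, hgl])
    intro i h1 h2
    have hi : i < n := by simpa [getCol, r1] using h1
    rw [← List.getD_eq_getElem _ 0 h1, ← List.getD_eq_getElem _ 0 h2, getCol_getD, getCol_getD,
      pvGA, pvGA, r3 i hi, List.getD_eq_getElem (g.map _) [] (by simpa [hgl] using hi),
      List.getElem_map, ← List.getD_eq_getElem g [] (by omega)]
  have hsolve : solveGridA g n = (List.range n).foldl (fun g col =>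
    let scan := (List.range n).foldl
        (fun (mi : Int × Nat) i => if pvGA g i col ≥ mi.1 then (pvGA g i col, i) else mi)
        (pvGA g 0 col, 0)
    let indc := scan.2
    let back := (PySem.List.pyRange ((n : Int) - 1) (indc : Int) (-1)).foldl
        (fun (st : Int × List (List Int)) row =>
          let temp := max st.1 (pvGA st.2 row.toNat col)
          (temp, pvSetA st.2 row.toNat col temp))
        (pvGA g (n - 1) col, g)
    let front := (PySem.List.pyRange 1 (indc : Int) 1).foldl
        (fun (st : Int × List (List Int)) row =>
          let temp := max st.1 (pvGA st.2 row.toNat col)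
          (temp, pvSetA st.2 row.toNat col temp))
        (pvGA back.2 0 col, back.2)
    front.2) R1 := rfl
  rw [hsolve]
  refine ⟨q1, fun i => by rw [q2 i, rlen i], ?_⟩
  intro i c hi hc
  rw [q4 i c hi hc, hcols c hc]

lemma minfold (rest : List (List Int)) (n : Nat) (h : ∀ r ∈ rest, r.length = n) :
    rest.foldl (fun acc r => min acc r.length) n = n := by
  induction rest with
  | nil => rfl
  | cons r t ih =>
    rw [List.foldl_cons, h r List.mem_cons_self, min_self]
    exact ih (fun x hx => h x (List.mem_cons_of_mem r hx))

lemma transpose_eq (b : List (List Int)) (n : Nat) (hb : Sq b n) (hn : 1 ≤ n) :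
    transposeAlt b = (List.range n).map (fun c => b.map (fun r => r.getD c 0)) := by
  obtain ⟨h1, h2⟩ := hb
  rcases b with _ | ⟨r0, rest⟩
  · simp at h1; omega
  · show (List.range (rest.foldl (fun acc r => min acc r.length) r0.length)).map _ = _
    have hr0 : r0.length = n := h2 r0 List.mem_cons_self
    rw [hr0, minfold rest n (fun x hx => h2 x (List.mem_cons_of_mem r0 hx))]

lemma transpose_sq (b : List (List Int)) (n : Nat) (hb : Sq b n) :
    Sq (transposeAlt b) n := by
  rcases Nat.eq_zero_or_pos n with h0 | h0
  · subst h0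
    obtain ⟨h1, _⟩ := hb
    rcases b with _ | ⟨r0, rest⟩
    · exact ⟨rfl, by simp [transposeAlt]⟩
    · simp at h1
  · rw [transpose_eq b n hb h0]
    refine ⟨by simp, ?_⟩
    intro r hr
    rw [List.mem_map] at hr
    obtain ⟨c, _, rfl⟩ := hr
    rw [List.length_map, hb.1]

lemma transpose_get (b : List (List Int)) (n : Nat) (hb : Sq b n) (hn : 1 ≤ n)
    (c i : Nat) (hc : c < n) (hi : i < n) :
    pvGA (transposeAlt b) c i = pvGA b i c := by
  rw [transpose_eq b n hb hn, pvGA]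
  have h1 : ((List.range n).map (fun c => b.map (fun r => r.getD c 0))).getD c []
      = b.map (fun r => r.getD c 0) := by
    rw [List.getD_eq_getElem _ [] (by simpa using hc), List.getElem_map, List.getElem_range]
  rw [h1, List.getD_eq_getElem _ 0 (by rw [List.length_map, hb.1]; omega), List.getElem_map,
    pvGA, List.getD_eq_getElem b [] (by rw [hb.1]; omega)]

lemma transpose_row (b : List (List Int)) (n : Nat) (hb : Sq b n) (hn : 1 ≤ n)
    (c : Nat) (hc : c < n) :
    (transposeAlt b).getD c [] = b.map (fun r => r.getD c 0) := by
  rw [transpose_eq b n hb hn,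
    List.getD_eq_getElem _ [] (by simpa using hc), List.getElem_map, List.getElem_range]


-- B's full pass characterised pointwise
lemma map_smooth_sq (b : List (List Int)) (n : Nat) (hb : Sq b n) : Sq (b.map smoothAlt) n := by
  refine ⟨by rw [List.length_map]; exact hb.1, ?_⟩
  intro r hr
  rw [List.mem_map] at hr
  obtain ⟨x, hx, rfl⟩ := hr
  rw [smoothAlt_length]
  exact hb.2 x hx

lemma map_smooth_getD (b : List (List Int)) (n : Nat) (hb : Sq b n) (i : Nat) (hi : i < n) :
    (b.map smoothAlt).getD i [] = smoothAlt (b.getD i []) := by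
  rw [List.getD_eq_getElem _ [] (by rw [List.length_map, hb.1]; omega), List.getElem_map,
    List.getD_eq_getElem b [] (by rw [hb.1]; omega)]

lemma stepAlt_spec (b : List (List Int)) (n : Nat) (hb : Sq b n) :
    Sq (stepAlt b) n ∧ ∀ i c, i < n → c < n →
      pvGA (stepAlt b) i c = (smoothAlt (getCol (b.map smoothAlt) c)).getD i 0 := by
  have hb1 : Sq (b.map smoothAlt) n := map_smooth_sq b n hb
  have ht1 : Sq (transposeAlt (b.map smoothAlt)) n := transpose_sq _ n hb1
  have ht2 : Sq ((transposeAlt (b.map smoothAlt)).map smoothAlt) n := map_smooth_sq _ n ht1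
  refine ⟨transpose_sq _ n ht2, ?_⟩
  intro i c hi hc
  have hn : 1 ≤ n := by omega
  rw [stepAlt, transpose_get _ n ht2 hn i c hi hc, pvGA,
    map_smooth_getD _ n ht1 c hc, transpose_row _ n hb1 hn c hc]
  rfl

-- one full pass of A against one full pass of B
lemma pass_spec (h b : List (List Int)) (n : Nat) (hh : WFg h n) (hb : Sq b n)
    (hrel : ∀ i c, i < n → c < n → pvGA h i c = pvGA b i c) :
    WFg (solveGridA h n) n ∧ Sq (stepAlt b) n ∧
      ∀ i c, i < n → c < n → pvGA (solveGridA h n) i c = pvGA (stepAlt b) i c := by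
  have hhl : h.length = n := hh.1
  have hrow : ∀ i, i < n → n ≤ (h.getD i []).length := by
    intro i hi
    rw [List.getD_eq_getElem h [] (by omega)]
    exact hh.2 _ (List.getElem_mem _)
  have hbrow : ∀ i, i < n → (b.getD i []).length = n := by
    intro i hi
    rw [List.getD_eq_getElem b [] (by rw [hb.1]; omega)]
    exact hb.2 _ (List.getElem_mem _)
  obtain ⟨s1, s2, s3⟩ := solveGridA_spec h n hhl hrow
  obtain ⟨t1, t2⟩ := stepAlt_spec b n hb
  refine ⟨⟨s1, ?_⟩, t1, ?_⟩
  · intro r hr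
    obtain ⟨i, hilen, rfl⟩ := List.mem_iff_getElem.mp hr
    rw [← List.getD_eq_getElem _ [] hilen, s2]
    exact hrow i (by rw [s1] at hilen; omega)
  · intro i c hi hc
    have hn : 1 ≤ n := by omega
    -- the two column lists agree
    have htake : ∀ i, i < n → (h.getD i []).take n = b.getD i [] := by
      intro i hi
      apply List.ext_getElem
      · rw [List.length_take, hbrow i hi]
        have := hrow i hi
        omega
      · intro d h1 h2
        have hd : d < n := by
          rw [List.length_take] at h1
          omega
        rw [← List.getD_eq_getElem _ 0 h1, ← List.getD_eq_getElem _ 0 h2,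
          getD_take _ _ _ hd]
        exact hrel i d hi hd
    have hcoleq : getCol (h.map (fun r => lineA r n)) c = getCol (b.map smoothAlt) c := by
      apply List.ext_getElem (by simp [getCol, hhl, hb.1])
      intro k h1 h2
      have hk : k < n := by simpa [getCol, hhl] using h1
      rw [← List.getD_eq_getElem _ 0 h1, ← List.getD_eq_getElem _ 0 h2,
        getCol_getD, getCol_getD, pvGA, pvGA,
        List.getD_eq_getElem (h.map _) [] (by rw [List.length_map, hhl]; omega),
        List.getElem_map, ← List.getD_eq_getElem h [] (by omega),
        map_smooth_getD b n hb k hk, lineA_char _ n hn (hrow k hk) c hc, htake k hk,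
        smoothAlt_getD _ c (by rw [hbrow k hk]; omega)]
    have hcollen : (getCol (b.map smoothAlt) c).length = n := by
      simp [getCol, hb.1]
    rw [s3 i c hi hc, t2 i c hi hc, hcoleq,
      lineA_char _ n hn (by omega) i hi,
      List.take_of_length_le (by omega),
      smoothAlt_getD _ i (by omega)]

-- sums over a square grid as double range sums
lemma sum_getD (r : List Int) :
    r.sum = ((List.range r.length).map (fun i => r.getD i 0)).sum := by
  congr 1
  apply List.ext_getElem (by simp)
  intro i h1 h2
  rw [List.getElem_map, List.getElem_range, List.getD_eq_getElem r 0 (by simpa using h2)]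

lemma sq_sum (g : List (List Int)) (n : Nat) (hg : Sq g n) :
    (g.map (fun r => r.sum)).sum
      = ((List.range n).map (fun o => ((List.range n).map (fun i => pvGA g o i)).sum)).sum := by
  have h1 : g.map (fun r => r.sum) = (List.range n).map (fun o => (g.getD o []).sum) := by
    apply List.ext_getElem (by simp [hg.1])
    intro o ho1 ho2
    rw [List.getElem_map, List.getElem_map, List.getElem_range,
      List.getD_eq_getElem g [] (by rw [hg.1]; simpa using ho2)]
  rw [h1]
  congr 1
  apply List.map_congr_left
  intro o ho
  rw [List.mem_range] at ho
  have hrl : (g.getD o []).length = n := by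
    rw [List.getD_eq_getElem g [] (by rw [hg.1]; omega)]
    exact hg.2 _ (List.getElem_mem _)
  rw [sum_getD, hrl]
  rfl

lemma sum_map_sub (L : List Nat) (f g : Nat → Int) :
    (L.map (fun x => f x - g x)).sum = (L.map f).sum - (L.map g).sum := by
  induction L with
  | nil => simp
  | cons x t ih =>
    simp only [List.map_cons, List.sum_cons, ih]
    ring

-- ===== VERDICT (by name: the statement is the Claim_ definition above) =====
theorem solve_spec : Claim_equal_solve := by
  unfold Claim_equal_solve Spec_solve
  intro grid _ hpre
  set n := grid.length with hn
  -- the initial grids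
  have hWF : WFg grid n := ⟨rfl, hpre⟩
  have hg0 : Sq (grid.map (fun row => row.take n)) n := by
    refine ⟨by simp [hn], ?_⟩
    intro r hr
    rw [List.mem_map] at hr
    obtain ⟨x, hx, rfl⟩ := hr
    rw [List.length_take]
    have := hpre x hx
    omega
  have hrel0 : ∀ i c, i < n → c < n →
      pvGA grid i c = pvGA (grid.map (fun row => row.take n)) i c := by
    intro i c hi hc
    rw [pvGA, pvGA, List.getD_eq_getElem (grid.map _) [] (by simpa using hi),
      List.getElem_map, ← List.getD_eq_getElem grid [] hi, getD_take _ _ _ hc]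
  obtain ⟨p1, p2, p3⟩ := pass_spec grid (grid.map (fun row => row.take n)) n hWF hg0 hrel0
  obtain ⟨q1, q2, q3⟩ := pass_spec _ _ n p1 p2 p3
  -- the two results, pointwise
  have hfinal : ∀ i c, i < n → c < n →
      pvGA (solveGridA (solveGridA grid n) n) i c
        = pvGA (stepAlt (stepAlt (grid.map (fun row => row.take n)))) i c := q3
  -- A's coin count as a double sum
  show (List.range n).foldl _ 0 = _
  have hinner : ∀ (o : Nat) (coins : Int),
      (List.range n).foldl (fun coins i =>
        coins + (pvGA (solveGridA (solveGridA grid n) n) o i - pvGA grid o i)) coins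
      = coins + ((List.range n).map (fun i =>
          pvGA (solveGridA (solveGridA grid n) n) o i - pvGA grid o i)).sum := by
    intro o coins
    exact PySem.List.foldl_add _ _ _
  have houter : (List.range n).foldl (fun coins o =>
      (List.range n).foldl (fun coins i =>
        coins + (pvGA (solveGridA (solveGridA grid n) n) o i - pvGA grid o i)) coins) 0
      = ((List.range n).map (fun o => ((List.range n).map (fun i =>
          pvGA (solveGridA (solveGridA grid n) n) o i - pvGA grid o i)).sum)).sum := by
    calc (List.range n).foldl (fun coins o =>
        (List.range n).foldl (fun coins i =>
          coins + (pvGA (solveGridA (solveGridA grid n) n) o i - pvGA grid o i)) coins) 0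
        = (List.range n).foldl (fun coins o =>
            coins + ((List.range n).map (fun i =>
              pvGA (solveGridA (solveGridA grid n) n) o i - pvGA grid o i)).sum) 0 := by
          congr 1
          funext coins o
          exact hinner o coins
      _ = 0 + ((List.range n).map (fun o => ((List.range n).map (fun i =>
            pvGA (solveGridA (solveGridA grid n) n) o i - pvGA grid o i)).sum)).sum :=
          PySem.List.foldl_add _ _ _
      _ = _ := by rw [zero_add]
  rw [houter]
  -- B's value
  show _ = (List.map (fun r => r.sum) (stepAlt (stepAlt (grid.map (fun row => row.take n))))).sum
    - (List.map (fun r => r.sum) (grid.map (fun row => row.take n))).sum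
  rw [sq_sum _ n q2, sq_sum _ n hg0]
  -- compare summand by summand
  have hsplit : ∀ o, o < n →
      ((List.range n).map (fun i =>
        pvGA (solveGridA (solveGridA grid n) n) o i - pvGA grid o i)).sum
      = ((List.range n).map (fun i =>
          pvGA (stepAlt (stepAlt (grid.map (fun row => row.take n)))) o i)).sum
        - ((List.range n).map (fun i =>
          pvGA (grid.map (fun row => row.take n)) o i)).sum := by
    intro o ho
    rw [← sum_map_sub]
    congr 1
    apply List.map_congr_left
    intro i hi
    rw [List.mem_range] at hi
    rw [hfinal o i ho hi, hrel0 o i ho hi]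
  calc ((List.range n).map (fun o => ((List.range n).map (fun i =>
        pvGA (solveGridA (solveGridA grid n) n) o i - pvGA grid o i)).sum)).sum
      = ((List.range n).map (fun o =>
          ((List.range n).map (fun i =>
            pvGA (stepAlt (stepAlt (grid.map (fun row => row.take n)))) o i)).sum
          - ((List.range n).map (fun i =>
            pvGA (grid.map (fun row => row.take n)) o i)).sum)).sum := by
        apply congrArg
        apply List.map_congr_left
        intro o ho
        rw [List.mem_range] at ho
        exact hsplit o ho
    _ = _ := sum_map_sub _ _ _
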